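-- pv_equiv track=rewrite | github.com/antimatter96/programming_in_python | week6/assignments_practice/2.py | table_to_record
-- ===== SOURCE A (Python) =====
-- def table_to_record(table_db):
--   output = []
--   length = 0
--   col_names = []
--
--   for col_data in table_db:
--     col_name = ''
--     for e in col_data:
--       col_name = e
--
--     col_names.append(col_name)
--     length = len(col_data[col_name])
--
--   for i in range(length):
--     data = {}
--     for col_name in col_names:
--       data[col_name] = None
--     output.append(data)
--
--   for col_data in table_db:
--     col_name = ''
--     for e in col_data:
--       col_name = e
--
--     for i in range(length):
--       output[i][col_name] = col_data[col_name][i]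
--
--   return output
-- ===== SOURCE B (Python) =====
-- def table_to_record(table_db):
--   # One pass over table_db collects the column names and a name -> column dict,
--   # then the rows are built directly, row-major; no None pre-fill, no in-place filling.
--   col_names = []
--   columns = {}
--   length = 0
--   for col_data in table_db:
--     col_name = ''
--     for e in col_data:
--       col_name = e
--     col_names.append(col_name)
--     columns[col_name] = col_data[col_name]
--     length = len(col_data[col_name])
--   return [{name: columns[name][i] for name in col_names} for i in range(length)]
-- ===== Notes on version B (the rewrite author's own statement) =====
-- stated objective: simpler
-- what changed: One pass over table_db collects column names and a name->column dict, then rows are built directly row-major by a comprehension, eliminating A's separate None-initialisation pass and its column-by-column in-place filling of pre-allocated row dicts.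
import Mathlib
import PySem

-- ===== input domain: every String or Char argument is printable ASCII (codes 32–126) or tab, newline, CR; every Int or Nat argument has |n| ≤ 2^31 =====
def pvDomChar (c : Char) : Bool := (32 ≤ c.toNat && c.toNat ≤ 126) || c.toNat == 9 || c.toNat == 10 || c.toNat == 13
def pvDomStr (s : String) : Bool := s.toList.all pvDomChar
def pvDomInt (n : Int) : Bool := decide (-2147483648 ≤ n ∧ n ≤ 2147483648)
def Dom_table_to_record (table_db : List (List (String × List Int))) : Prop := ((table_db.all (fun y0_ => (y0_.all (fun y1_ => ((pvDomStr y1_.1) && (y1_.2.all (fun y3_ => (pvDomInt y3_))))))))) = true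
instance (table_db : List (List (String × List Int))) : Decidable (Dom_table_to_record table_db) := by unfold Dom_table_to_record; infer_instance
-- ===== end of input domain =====

-- B replaces A's three passes (name scan, None pre-fill, column-by-column in-place fill) by one
-- pass collecting a name -> column dict plus a direct row-major build; same values, no speed claim.
-- Each inner `List (String × List Int)` stands for the Python dict built from it (last value wins,
-- first occurrence fixes the position), hence the `PySem.Dict.ofList` view in the shared helpers.

-- `pvName l` = Python's `for e in col_data: col_name = e` over dict(l): the last key ('' for {}).
def pvName (col_data : List (String × List Int)) : String :=
  (PySem.Dict.ofList col_data).keys.foldl (fun _ e => e) ""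

-- `pvCol l` = `col_data[col_name]`; `[]` stands in for the KeyError case (empty dict), which Pre_ excludes.
def pvCol (col_data : List (String × List Int)) : List Int :=
  (PySem.Dict.ofList col_data).getD (pvName col_data) []

-- ===== PORT A =====
def table_to_record (table_db : List (List (String × List Int))) : List (List (String × Int)) :=
  -- loop 1: collect col_names; length := len of the current column (last one wins)
  let s1 := table_db.foldl
    (fun (acc : List String × Nat) col_data =>
      (acc.1 ++ [pvName col_data], (pvCol col_data).length)) ([], 0)
  let col_names := s1.1
  let len := s1.2
  -- loop 2: output.append({c: None for c in col_names}); 0 is the None placeholder, always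
  -- overwritten by loop 3 (every name in col_names is revisited there)
  let output := (List.range len).foldl
    (fun (o : List (PySem.Dict String Int)) _ =>
      o ++ [col_names.foldl (fun (r : PySem.Dict String Int) c => r.insert c 0) PySem.Dict.empty]) []
  -- loop 3: output[i][col_name] = col_data[col_name][i]; getD/pyGetD defaults are never hit under Pre_
  let output2 := table_db.foldl
    (fun o col_data =>
      (List.range len).foldl
        (fun o i => o.set i ((o.getD i PySem.Dict.empty).insert (pvName col_data)
          (PySem.List.pyGetD (pvCol col_data) (i : Int) 0))) o) output
  output2.map (·.items)

-- ===== PORT B =====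
def table_to_record_alt (table_db : List (List (String × List Int))) : List (List (String × Int)) :=
  -- one pass: col_names, columns dict, length
  let s := table_db.foldl
    (fun (acc : List String × PySem.Dict String (List Int) × Nat) col_data =>
      (acc.1 ++ [pvName col_data], acc.2.1.insert (pvName col_data) (pvCol col_data),
        (pvCol col_data).length))
    ([], PySem.Dict.empty, 0)
  -- row-major comprehension: [{name: columns[name][i] for name in col_names} for i in range(length)]
  (List.range s.2.2).map (fun (i : Nat) =>
    (s.1.foldl
      (fun (r : PySem.Dict String Int) name =>
        r.insert name (PySem.List.pyGetD ((s.2.1.getD name []) ) (i : Int) 0))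
      PySem.Dict.empty).items)

-- ===== PRECONDITION & SPEC =====
-- final value of A's `length`: the last column's length (0 for an empty table)
def pvFinalLen (table_db : List (List (String × List Int))) : Nat :=
  table_db.foldl (fun _ l => (pvCol l).length) 0

-- A raises exactly on: an empty dict (KeyError on col_data['']) or a column shorter than the
-- final length (IndexError in loop 3); Pre_ excludes exactly those inputs.
def Pre_table_to_record (table_db : List (List (String × List Int))) : Prop :=
  (∀ l ∈ table_db, l ≠ []) ∧ (∀ l ∈ table_db, pvFinalLen table_db ≤ (pvCol l).length)
instance (table_db : List (List (String × List Int))) : Decidable (Pre_table_to_record table_db) := by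
  unfold Pre_table_to_record; infer_instance

def pvWitness_table_to_record : (List (List (String × List Int))) :=
  [[("a", [1, 2])], [("b", [3, 4]), ("c", [5, 6])]]

def Spec_table_to_record (table_db : List (List (String × List Int))) (out : List (List (String × Int))) : Prop := out = table_to_record_alt table_db
instance (table_db : List (List (String × List Int))) (out : List (List (String × Int))) : Decidable (Spec_table_to_record table_db out) := by unfold Spec_table_to_record; infer_instance

-- ===== CLAIM (what is proved, stated in full; the proofs are below) =====
def Claim_equal_table_to_record : Prop := ∀ (table_db : List (List (String × List Int))), Dom_table_to_record table_db → Pre_table_to_record table_db → Spec_table_to_record table_db (table_to_record table_db)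

-- ===== LEMMAS AND PROOFS =====

-- a run of dict inserts, and the value of the LAST insert for a key
def pvApplyIns {V : Type} (ps : List (String × V)) (r : PySem.Dict String V) : PySem.Dict String V :=
  ps.foldl (fun r p => r.insert p.1 p.2) r

def pvLookLast {V : Type} (ps : List (String × V)) (k : String) : Option V :=
  match ps with
  | [] => none
  | (k', v) :: t => (pvLookLast t k).or (if k' = k then some v else none)

theorem pvApplyIns_nil {V : Type} (r : PySem.Dict String V) : pvApplyIns [] r = r := rfl

theorem pvApplyIns_cons {V : Type} (p : String × V) (ps : List (String × V)) (r : PySem.Dict String V) :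
    pvApplyIns (p :: ps) r = pvApplyIns ps (r.insert p.1 p.2) := rfl

theorem pvLookLast_cons {V : Type} (k' : String) (v : V) (t : List (String × V)) (k : String) :
    pvLookLast ((k', v) :: t) k = (pvLookLast t k).or (if k' = k then some v else none) := rfl

theorem pvLookLast_isSome {V : Type} (ps : List (String × V)) (k : String) :
    (pvLookLast ps k).isSome = true ↔ k ∈ ps.map Prod.fst := by
  induction ps with
  | nil => simp [pvLookLast]
  | cons p t ih =>
    obtain ⟨k', v⟩ := p
    rw [pvLookLast_cons, List.map_cons, List.mem_cons, ← ih]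
    cases h : pvLookLast t k with
    | some w => simp
    | none =>
      by_cases hk : k' = k
      · subst hk; simp
      · simp [hk]
        exact fun hh => hk hh.symm

theorem pvGet?_applyIns {V : Type} (ps : List (String × V)) (r : PySem.Dict String V) (k : String) :
    (pvApplyIns ps r).get? k = (pvLookLast ps k).or (r.get? k) := by
  induction ps generalizing r with
  | nil => simp [pvApplyIns, pvLookLast]
  | cons p t ih =>
    obtain ⟨k', v⟩ := p
    rw [pvApplyIns_cons, ih, pvLookLast_cons, Option.or_assoc]
    congr 1
    by_cases hk : k' = k
    · subst hk
      simp
    · rw [if_neg hk, Option.none_or, PySem.Dict.get?_insert,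
        if_neg (fun hh => hk hh.symm)]

theorem pvKeys_applyIns {V : Type} (ps : List (String × V)) (r : PySem.Dict String V) :
    (pvApplyIns ps r).keys = PySem.Set.update r.keys (ps.map Prod.fst) :=
  PySem.Dict.keys_foldl_insert_key ps Prod.fst (fun _ p => p.2) r

theorem pvNodupKeys_applyIns {V : Type} (ps : List (String × V)) (r : PySem.Dict String V)
    (h : r.keys.Nodup) : (pvApplyIns ps r).keys.Nodup :=
  PySem.Dict.nodup_keys_foldl_insert_key ps Prod.fst (fun _ p => p.2) r h

theorem pvDict_eq_of {V : Type} (r1 r2 : PySem.Dict String V) (hn : r1.keys.Nodup)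
    (hk : r1.keys = r2.keys) (hg : ∀ k, r1.get? k = r2.get? k) : r1 = r2 := by
  apply PySem.Dict.ext
  have hn2 : r2.keys.Nodup := hk ▸ hn
  have hlen : r1.items.length = r2.items.length := by
    have := congrArg List.length hk
    simpa [PySem.Dict.keys] using this
  apply List.ext_getElem hlen
  intro j hj1 hj2
  have hkey : r1.items[j].1 = r2.items[j].1 := by
    have := congrArg (fun l => l[j]?) hk
    simpa [PySem.Dict.keys, List.getElem?_eq_getElem, hj1, hj2] using this
  have h1 : r1.get? r1.items[j].1 = some r1.items[j].2 :=
    PySem.Dict.get?_of_mem_items r1 (List.getElem_mem hj1) hn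
  have h2 : r2.get? r2.items[j].1 = some r2.items[j].2 :=
    PySem.Dict.get?_of_mem_items r2 (List.getElem_mem hj2) hn2
  have h3 := (hg r1.items[j].1).symm.trans h1
  rw [hkey, h2] at h3
  have hv : r2.items[j].2 = r1.items[j].2 := by injection h3
  exact Prod.ext hkey hv.symm

theorem pvKeys_insert_eq_add {V : Type} (r : PySem.Dict String V) (k : String) (v : V) :
    (r.insert k v).keys = PySem.Set.add r.keys k := by
  by_cases h : k ∈ r.keys
  · rw [PySem.Dict.keys_insert_of_contains r v ((PySem.Dict.contains_iff_mem_keys r k).mpr h),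
      PySem.Set.add_of_mem h]
  · rw [PySem.Dict.keys_insert_of_not_contains r v, PySem.Set.add_of_not_mem h]
    rw [PySem.Dict.contains_eq_decide_mem_keys]
    simp [h]

-- the main congruence: two insert runs with the same key sequence and the same last value per key,
-- from starts that agree outside the key sequence, end in the same dict
theorem pvApplyIns_congr {V : Type} (ps qs : List (String × V)) (r1 r2 : PySem.Dict String V)
    (hk : ps.map Prod.fst = qs.map Prod.fst)
    (hl : ∀ k, pvLookLast ps k = pvLookLast qs k)
    (hn1 : r1.keys.Nodup) (hn2 : r2.keys.Nodup)
    (hku : PySem.Set.update r1.keys (ps.map Prod.fst) = PySem.Set.update r2.keys (qs.map Prod.fst))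
    (hg : ∀ k, k ∈ ps.map Prod.fst ∨ r1.get? k = r2.get? k) :
    pvApplyIns ps r1 = pvApplyIns qs r2 := by
  induction ps generalizing qs r1 r2 with
  | nil =>
    cases qs with
    | cons q qt => simp at hk
    | nil =>
      rw [pvApplyIns_nil, pvApplyIns_nil]
      refine pvDict_eq_of r1 r2 hn1 ?_ ?_
      · simpa [PySem.Set.update_nil] using hku
      · intro k; rcases hg k with h | h
        · simp at h
        · exact h
  | cons p pt ih =>
    cases qs with
    | nil => simp at hk
    | cons q qt =>
      obtain ⟨k, v⟩ := p
      obtain ⟨k', w⟩ := q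
      simp only [List.map_cons, List.cons.injEq] at hk
      obtain ⟨hkk, hk⟩ := hk
      subst hkk
      rw [pvApplyIns_cons, pvApplyIns_cons]
      have hmem_iff : ∀ k1, k1 ∈ pt.map Prod.fst ↔ k1 ∈ qt.map Prod.fst := by
        intro k1; rw [hk]
      apply ih
      · exact hk
      · intro k1
        by_cases h1 : k1 = k
        · subst h1
          have hfull := hl k1
          rw [pvLookLast_cons, pvLookLast_cons, if_pos rfl, if_pos rfl] at hfull
          cases hpt : pvLookLast pt k1 with
          | some u =>
            have hq : (pvLookLast qt k1).isSome = true := by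
              rw [pvLookLast_isSome, ← hmem_iff, ← pvLookLast_isSome, hpt]; rfl
            cases hqt : pvLookLast qt k1 with
            | none => simp [hqt] at hq
            | some u' =>
              rw [hpt, hqt] at hfull
              simpa using hfull
          | none =>
            cases hqt : pvLookLast qt k1 with
            | some u' =>
              have hp : (pvLookLast pt k1).isSome = true := by
                rw [pvLookLast_isSome, hmem_iff, ← pvLookLast_isSome, hqt]; rfl
              simp [hpt] at hp
            | none => simp
        · have hfull := hl k1
          rw [pvLookLast_cons, pvLookLast_cons,
            if_neg (fun hh => h1 hh.symm), if_neg (fun hh => h1 hh.symm),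
            Option.or_none, Option.or_none] at hfull
          exact hfull
      · exact PySem.Dict.nodup_keys_insert r1 k v hn1
      · exact PySem.Dict.nodup_keys_insert r2 k w hn2
      · rw [pvKeys_insert_eq_add, pvKeys_insert_eq_add,
          ← PySem.Set.update_cons, ← PySem.Set.update_cons]
        simpa using hku
      · intro k1
        by_cases h1 : k1 = k
        · subst h1
          by_cases h2 : k1 ∈ pt.map Prod.fst
          · exact Or.inl h2
          · right
            have hv : v = w := by
              have hpt : pvLookLast pt k1 = none := by
                cases h : pvLookLast pt k1 with
                | none => rfl
                | some u => exact absurd ((pvLookLast_isSome pt k1).mp (by simp [h])) h2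
              have hqt : pvLookLast qt k1 = none := by
                cases h : pvLookLast qt k1 with
                | none => rfl
                | some u =>
                  exact absurd ((hmem_iff k1).mpr ((pvLookLast_isSome qt k1).mp (by simp [h]))) h2
              have hfull := hl k1
              rw [pvLookLast_cons, pvLookLast_cons, if_pos rfl, if_pos rfl,
                hpt, hqt, Option.none_or, Option.none_or] at hfull
              injection hfull
            rw [PySem.Dict.get?_insert, PySem.Dict.get?_insert, if_pos rfl, if_pos rfl, hv]
        · rcases hg k1 with h | h
          · rw [List.map_cons, List.mem_cons] at h
            rcases h with h | h
            · exact absurd h h1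
            · exact Or.inl h
          · right
            rw [PySem.Dict.get?_insert, PySem.Dict.get?_insert, if_neg h1, if_neg h1, h]

-- last-value lookup through a value map, and over a key-determined pair list
theorem pvLookLast_map {V W : Type} (f : V → W) (ps : List (String × V)) (k : String) :
    pvLookLast (ps.map (fun p => (p.1, f p.2))) k = (pvLookLast ps k).map f := by
  induction ps with
  | nil => simp [pvLookLast]
  | cons p t ih =>
    obtain ⟨k', v⟩ := p
    rw [List.map_cons]
    rw [pvLookLast_cons, pvLookLast_cons, ih]
    cases h : pvLookLast t k with
    | some w => simp
    | none => by_cases hk : k' = k <;> simp [hk]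

theorem pvLookLast_keyfun {V : Type} (names : List String) (g : String → V) (k : String) :
    pvLookLast (names.map (fun nm => (nm, g nm))) k = if k ∈ names then some (g k) else none := by
  induction names with
  | nil => simp [pvLookLast]
  | cons nm t ih =>
    rw [List.map_cons, pvLookLast_cons, ih]
    by_cases ht : k ∈ t
    · simp [ht]
    · by_cases hk : nm = k
      · subst hk; simp [ht]
      · have hne : ¬k = nm := fun hh => hk hh.symm
        simp [ht, hk, hne]

-- a loop `for x in l: r[key x] = g x` is an insert run
theorem pvFoldl_insert_eq_applyIns {α V : Type} (l : List α) (key : α → String) (g : α → V)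
    (r : PySem.Dict String V) :
    l.foldl (fun d x => d.insert (key x) (g x)) r = pvApplyIns (l.map (fun x => (key x, g x))) r := by
  induction l generalizing r with
  | nil => rfl
  | cons x t ih => rw [List.foldl_cons, List.map_cons, pvApplyIns_cons]; exact ih _

theorem pvUpdate_ofList_self (xs : List String) :
    PySem.Set.update (PySem.Set.ofList xs) xs = PySem.Set.ofList xs := by
  rw [PySem.Set.update_eq_append_filter]
  have h : List.filter (fun y => !(PySem.Set.ofList xs).contains y) (PySem.Set.ofList xs) = [] := by
    apply List.filter_eq_nil_iff.mpr
    intro y hy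
    simpa using hy
  rw [h, List.append_nil]

-- THE ROW EQUALITY: A's pre-filled row after the column-by-column fill equals B's directly built row
theorem pvRow_eq (tdb : List (List (String × List Int))) (i : Int) :
    pvApplyIns (tdb.map (fun l => (pvName l, PySem.List.pyGetD (pvCol l) i 0)))
      (pvApplyIns ((tdb.map pvName).map (fun c => (c, (0 : Int)))) PySem.Dict.empty)
    = pvApplyIns ((tdb.map pvName).map (fun nm => (nm,
        PySem.List.pyGetD ((pvApplyIns (tdb.map (fun l => (pvName l, pvCol l))) PySem.Dict.empty).getD nm []) i 0)))
        PySem.Dict.empty := by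
  have hnames : (tdb.map (fun l => (pvName l, PySem.List.pyGetD (pvCol l) i 0))).map Prod.fst
      = tdb.map pvName := by simp [List.map_map]
  have hnames2 : (tdb.map (fun l => (pvName l, pvCol l))).map Prod.fst = tdb.map pvName := by
    simp [List.map_map]
  have hpsA : tdb.map (fun l => (pvName l, PySem.List.pyGetD (pvCol l) i 0))
      = (tdb.map (fun l => (pvName l, pvCol l))).map (fun p => (p.1, PySem.List.pyGetD p.2 i 0)) := by
    simp [List.map_map]
  have hzk : ((tdb.map pvName).map (fun c => (c, (0 : Int)))).map Prod.fst = tdb.map pvName := by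
    simp [List.map_map]
  have hbk : ((tdb.map pvName).map (fun nm => (nm,
      PySem.List.pyGetD ((pvApplyIns (tdb.map (fun l => (pvName l, pvCol l))) PySem.Dict.empty).getD nm []) i 0))).map Prod.fst
      = tdb.map pvName := by simp [List.map_map]
  have hinit_keys : (pvApplyIns ((tdb.map pvName).map (fun c => (c, (0 : Int)))) PySem.Dict.empty).keys
      = PySem.Set.ofList (tdb.map pvName) := by
    rw [pvKeys_applyIns, hzk]
    simp [PySem.Dict.keys_empty]
    rw [PySem.Set.update_nil_left]
  -- step 1: the zero pre-fill is absorbed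
  have step1 : pvApplyIns (tdb.map (fun l => (pvName l, PySem.List.pyGetD (pvCol l) i 0)))
      (pvApplyIns ((tdb.map pvName).map (fun c => (c, (0 : Int)))) PySem.Dict.empty)
      = pvApplyIns (tdb.map (fun l => (pvName l, PySem.List.pyGetD (pvCol l) i 0))) PySem.Dict.empty := by
    apply pvApplyIns_congr
    · rfl
    · intro k; rfl
    · exact pvNodupKeys_applyIns _ _ (by simp [PySem.Dict.keys_empty])
    · simp [PySem.Dict.keys_empty]
    · rw [hinit_keys, hnames]
      simp only [PySem.Dict.keys_empty]
      rw [PySem.Set.update_nil_left]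
      exact pvUpdate_ofList_self _
    · intro k
      by_cases h : k ∈ tdb.map pvName
      · exact Or.inl (hnames ▸ h)
      · right
        rw [pvGet?_applyIns, pvLookLast_keyfun, PySem.Dict.get?_empty]
        simp [h]
  rw [step1]
  -- step 2: A's per-column values agree with B's dict-lookup values
  apply pvApplyIns_congr
  · rw [hnames, hbk]
  · intro k
    rw [hpsA,
      pvLookLast_map (fun c => PySem.List.pyGetD c i 0) (tdb.map (fun l => (pvName l, pvCol l))) k,
      pvLookLast_keyfun (tdb.map pvName)
        (fun nm => PySem.List.pyGetD
          ((pvApplyIns (tdb.map (fun l => (pvName l, pvCol l))) PySem.Dict.empty).getD nm []) i 0) k]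
    by_cases h : k ∈ tdb.map pvName
    · have hs : (pvLookLast (tdb.map (fun l => (pvName l, pvCol l))) k).isSome = true := by
        rw [pvLookLast_isSome, hnames2]; exact h
      cases hc : pvLookLast (tdb.map (fun l => (pvName l, pvCol l))) k with
      | none => rw [hc] at hs; simp at hs
      | some c =>
        rw [PySem.Dict.getD_eq_get?_getD, pvGet?_applyIns, PySem.Dict.get?_empty, hc]
        simp [h]
    · cases hc : pvLookLast (tdb.map (fun l => (pvName l, pvCol l))) k with
      | some c =>
        have hs : (pvLookLast (tdb.map (fun l => (pvName l, pvCol l))) k).isSome = true := by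
          rw [hc]; rfl
        rw [pvLookLast_isSome, hnames2] at hs
        exact absurd hs h
      | none => simp [h]
  · simp [PySem.Dict.keys_empty]
  · simp [PySem.Dict.keys_empty]
  · rw [hnames, hbk]
  · intro k; exact Or.inr rfl

-- loop-shape lemmas for A's loops 2 and 3
theorem pvSet_map_range {β : Type} (n m : Nat) (u : Nat → β) (x : β) (hm : m < n) :
    ((List.range n).map u).set m x = (List.range n).map (fun i => if i = m then x else u i) := by
  apply List.ext_getElem
  · simp
  · intro j hj1 hj2
    simp at hj1
    simp [List.getElem_set, List.getElem_map, List.getElem_range, eq_comm]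

theorem pvGetD_map_range {β : Type} (n m : Nat) (u : Nat → β) (d : β) (hm : m < n) :
    ((List.range n).map u).getD m d = u m := by
  simp [List.getD_eq_getElem?_getD, hm]

theorem pvInnerLoop (n : Nat) (t : Nat → PySem.Dict String Int) (c : String) (v : Nat → Int) :
    (List.range n).foldl
      (fun o i => o.set i ((o.getD i PySem.Dict.empty).insert c (v i))) ((List.range n).map t)
    = (List.range n).map (fun i => (t i).insert c (v i)) := by
  have aux : ∀ m, m ≤ n → (List.range m).foldl
      (fun o i => o.set i ((o.getD i PySem.Dict.empty).insert c (v i))) ((List.range n).map t)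
      = (List.range n).map (fun i => if i < m then (t i).insert c (v i) else t i) := by
    intro m
    induction m with
    | zero => intro _; simp
    | succ m ih =>
      intro hm
      rw [List.range_succ, List.foldl_append, ih (Nat.le_of_succ_le hm)]
      have hmn : m < n := hm
      simp only [List.foldl_cons, List.foldl_nil]
      rw [pvGetD_map_range n m _ _ hmn, pvSet_map_range n m _ _ hmn]
      apply List.map_congr_left
      intro a ha
      simp at ha
      by_cases h1 : a = m
      · subst h1; simp
      · have : a < m + 1 ↔ a < m := by omega
        simp [h1, this]
  rw [aux n (Nat.le_refl n)]
  apply List.map_congr_left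
  intro a ha
  simp at ha
  simp [ha]

theorem pvOuterLoop (n : Nat) (tb : List (List (String × List Int)))
    (t : Nat → PySem.Dict String Int) :
    tb.foldl
      (fun o col_data =>
        (List.range n).foldl
          (fun o i => o.set i ((o.getD i PySem.Dict.empty).insert (pvName col_data)
            (PySem.List.pyGetD (pvCol col_data) (i : Int) 0))) o) ((List.range n).map t)
    = (List.range n).map (fun (j : Nat) =>
        pvApplyIns (tb.map (fun l => (pvName l, PySem.List.pyGetD (pvCol l) (j : Int) 0))) (t j)) := by
  induction tb generalizing t with
  | nil =>
    rw [List.foldl_nil]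
    apply List.map_congr_left
    intro a _
    rw [List.map_nil, pvApplyIns_nil]
  | cons l tl ih =>
    rw [List.foldl_cons,
      pvInnerLoop n t (pvName l) (fun j => PySem.List.pyGetD (pvCol l) (j : Int) 0),
      ih (fun j => (t j).insert (pvName l) (PySem.List.pyGetD (pvCol l) (j : Int) 0))]
    apply List.map_congr_left
    intro a _
    rw [List.map_cons, pvApplyIns_cons]

-- the two one-pass folds, componentwise
theorem pvLoop1A (tb : List (List (String × List Int))) (cs : List String) (n : Nat) :
    tb.foldl (fun (acc : List String × Nat) col_data =>
        (acc.1 ++ [pvName col_data], (pvCol col_data).length)) (cs, n)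
    = (cs ++ tb.map pvName, tb.foldl (fun _ l => (pvCol l).length) n) := by
  induction tb generalizing cs n with
  | nil => simp
  | cons l tl ih => simp [List.foldl_cons, ih]

theorem pvLoop1B (tb : List (List (String × List Int))) (cs : List String)
    (d : PySem.Dict String (List Int)) (n : Nat) :
    tb.foldl (fun (acc : List String × PySem.Dict String (List Int) × Nat) col_data =>
        (acc.1 ++ [pvName col_data], acc.2.1.insert (pvName col_data) (pvCol col_data),
          (pvCol col_data).length)) (cs, d, n)
    = (cs ++ tb.map pvName, pvApplyIns (tb.map (fun l => (pvName l, pvCol l))) d,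
        tb.foldl (fun _ l => (pvCol l).length) n) := by
  induction tb generalizing cs d n with
  | nil => simp [pvApplyIns]
  | cons l tl ih => simp [List.foldl_cons, ih, pvApplyIns]

-- ===== VERDICT (by name: the statement is the Claim_ definition above) =====
theorem table_to_record_spec : Claim_equal_table_to_record := by
  intro tdb _ _
  unfold Spec_table_to_record
  unfold table_to_record table_to_record_alt
  simp only [pvLoop1A, pvLoop1B, List.nil_append]
  rw [PySem.List.foldl_append_singleton_eq_map
    (f := fun _ => (tdb.map pvName).foldl (fun (r : PySem.Dict String Int) c => r.insert c 0) PySem.Dict.empty)]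
  rw [List.nil_append]
  rw [pvOuterLoop]
  rw [List.map_map]
  apply List.map_congr_left
  intro a _
  simp only [Function.comp]
  rw [pvFoldl_insert_eq_applyIns _ (fun c => c) (fun _ => (0 : Int)),
    pvFoldl_insert_eq_applyIns _ (fun nm => nm) _]
  rw [pvRow_eq]
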